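-- pv_equiv track=rewrite | github.com/pelirodri/LaWea | Interpreters/Python3/lawea.py | parse_raw_input
-- ===== SOURCE A (Python) =====
-- def parse_raw_input(text):
--     text = enumerate(text.split('\n'))
--     command_lines = filter(lambda line: line[1] and line[1][0] != '#', text)
--     commands = []
--     for row, line in command_lines:
--         spaces = [pos for pos, char in enumerate(line) if char == ' ']
--         commands += [
--             (row + 1, column + 2, command)
--             for column, command
--             in (zip([0] + spaces, line.split(' ')))
--         ]
--     return commands
-- ===== SOURCE B (Python) =====
-- def parse_raw_input(text):
--     commands = []
--     for row, line in enumerate(text.split('\n')):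
--         if not line or line[0] == '#':
--             continue
--         cursor = 0
--         for i, token in enumerate(line.split(' ')):
--             commands.append((row + 1, cursor + 2, token))
--             cursor += len(token) + (1 if i else 0)
--     return commands
-- ===== Notes on version B (the rewrite author's own statement) =====
-- stated objective: faster
-- what changed: Replaces A's per-line character scan for space positions plus a zip against the token list by a single pass over the tokens that maintains a running column cursor advanced by each token's length.
import Mathlib
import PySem

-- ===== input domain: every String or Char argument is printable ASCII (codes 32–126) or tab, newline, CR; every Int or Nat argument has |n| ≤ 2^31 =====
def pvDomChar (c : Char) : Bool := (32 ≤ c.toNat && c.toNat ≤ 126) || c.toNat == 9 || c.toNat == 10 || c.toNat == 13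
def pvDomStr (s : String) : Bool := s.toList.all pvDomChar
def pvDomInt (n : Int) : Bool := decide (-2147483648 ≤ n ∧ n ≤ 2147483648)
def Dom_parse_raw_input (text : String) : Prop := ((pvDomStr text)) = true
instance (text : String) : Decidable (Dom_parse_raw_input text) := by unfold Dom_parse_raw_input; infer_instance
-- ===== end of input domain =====

-- B replaces A's per-line space-position scan + zip by one pass over the tokens with a running column cursor (objective: faster by a constant factor — no per-character index list is built).

-- ===== PORT A =====
-- A: split into lines, filter (non-empty, not starting '#'), per line collect space
-- positions and zip (0 :: spaces) with line.split(' ').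
def parse_raw_input (text : String) : List (Int × Int × String) :=
  let lines := PySem.List.enumerate (PySem.Chars.splitOn text.toList ['\n'])
  let commandLines := lines.filter
    (fun rl => !rl.2.isEmpty && (PySem.List.pyGet? rl.2 0 != some '#'))
  commandLines.foldl
    (fun commands rl =>
      let spaces := ((PySem.List.enumerate rl.2).filter (fun pc => pc.2 == ' ')).map (·.1)
      commands ++
        (((0 :: spaces).zip (PySem.Chars.splitOn rl.2 [' '])).map
          (fun ct => (rl.1 + 1, ct.1 + 2, String.ofList ct.2))))
    []

-- ===== PORT B =====
-- B: one fold over the enumerated lines; skipped lines handled inside the fold; per kept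
-- line a fold over the enumerated tokens carrying the pair (commands, cursor).
def parse_raw_input_alt (text : String) : List (Int × Int × String) :=
  (PySem.List.enumerate (PySem.Chars.splitOn text.toList ['\n'])).foldl
    (fun commands rl =>
      if rl.2.isEmpty || PySem.List.pyGet? rl.2 0 == some '#' then commands
      else
        ((PySem.List.enumerate (PySem.Chars.splitOn rl.2 [' '])).foldl
          (fun s it =>
            (s.1 ++ [(rl.1 + 1, s.2 + 2, String.ofList it.2)],
             s.2 + (it.2.length : Int) + (if it.1 == 0 then 0 else 1)))
          (commands, 0)).1)
    []

-- ===== PRECONDITION & SPEC =====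
def Spec_parse_raw_input (text : String) (out : List (Int × Int × String)) : Prop := out = parse_raw_input_alt text
instance (text : String) (out : List (Int × Int × String)) : Decidable (Spec_parse_raw_input text out) := by unfold Spec_parse_raw_input; infer_instance

-- ===== CLAIM (what is proved, stated in full; the proofs are below) =====
def Claim_equal_parse_raw_input : Prop := ∀ (text : String), Dom_parse_raw_input text → Spec_parse_raw_input text (parse_raw_input text)

-- ===== LEMMAS AND PROOFS =====

-- Reference splitter: Python's line.split(' ') as a structural recursion.
def splitSp : List Char → List (List Char)
  | [] => [[]]
  | c :: rest => if c = ' ' then [] :: splitSp rest else (splitSp rest).modifyHead (c :: ·)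

-- Positions of the spaces of cs, the first character having index k.
def spacesAt : List Char → Int → List Int
  | [], _ => []
  | c :: rest, k => if c = ' ' then k :: spacesAt rest (k + 1) else spacesAt rest (k + 1)

-- Columns B's cursor visits for the tokens ts, starting at p.
def cursList : List (List Char) → Int → List Int
  | [], _ => []
  | t :: ts, p => p :: cursList ts (p + (t.length : Int) + 1)

lemma splitSp_ne_nil (cs : List Char) : splitSp cs ≠ [] := by
  induction cs with
  | nil => simp [splitSp]
  | cons c rest ih =>
    simp only [splitSp]
    split
    · simp
    · cases h : splitSp rest with
      | nil => exact absurd h ih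
      | cons t ts => simp

lemma go_space : ∀ (fuel : Nat) (l cur : List Char) (acc : List (List Char)),
    l.length < fuel →
    PySem.Chars.splitOn.go [' '] fuel l cur acc
      = acc.reverse ++ (splitSp l).modifyHead (cur.reverse ++ ·) := by
  intro fuel
  induction fuel with
  | zero => intro l cur acc h; omega
  | succ fuel ih =>
    intro l cur acc h
    cases l with
    | nil =>
      simp [PySem.Chars.splitOn.go, splitSp]
    | cons c rest =>
      by_cases hc : c = ' '
      · subst hc
        rw [PySem.Chars.splitOn.go]
        simp only [List.isPrefixOf, Bool.and_true, beq_self_eq_true, if_pos, List.length_cons]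
        simp only [List.length_nil, List.drop_succ_cons, List.drop_zero, Nat.zero_add]
        rw [ih _ _ _ (by simpa using Nat.lt_of_succ_lt_succ h)]
        simp only [splitSp]
        cases hs : splitSp rest with
        | nil => exact absurd hs (splitSp_ne_nil rest)
        | cons t ts => simp
      · rw [PySem.Chars.splitOn.go]
        rw [if_neg (by simp [List.isPrefixOf]; intro hb; exact hc (by simpa using hb.symm))]
        rw [ih _ _ _ (by simpa using Nat.lt_of_succ_lt_succ h)]
        simp only [splitSp, if_neg hc]
        cases hs : splitSp rest with
        | nil => exact absurd hs (splitSp_ne_nil rest)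
        | cons t ts => simp

lemma splitOn_space (cs : List Char) : PySem.Chars.splitOn cs [' '] = splitSp cs := by
  rw [PySem.Chars.splitOn, go_space _ _ _ _ (by omega)]
  cases hs : splitSp cs with
  | nil => exact absurd hs (splitSp_ne_nil cs)
  | cons t ts => simp

-- A's list comprehension for space positions computes spacesAt.
lemma spaces_port (cs : List Char) : ∀ (k : Int),
    ((PySem.List.enumerate cs k).filter (fun pc => pc.2 == ' ')).map (·.1) = spacesAt cs k := by
  induction cs with
  | nil => intro k; simp [PySem.List.enumerate_nil, spacesAt]
  | cons c rest ih =>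
    intro k
    rw [PySem.List.enumerate_cons]
    by_cases hc : c = ' '
    · subst hc; simp [spacesAt, ih]
    · simp [spacesAt, hc, ih]

-- The spaces of cs sit exactly at B's cursor columns for the tail tokens.
lemma spacesAt_eq_cursList : ∀ (cs : List Char) (p : Int) (t : List Char) (ts : List (List Char)),
    splitSp cs = t :: ts → spacesAt cs p = cursList ts (p + (t.length : Int)) := by
  intro cs
  induction cs with
  | nil =>
    intro p t ts h
    simp only [splitSp] at h
    cases h
    simp [spacesAt, cursList]
  | cons c rest ih =>
    intro p t ts h
    by_cases hc : c = ' '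
    · subst hc
      simp only [splitSp] at h
      cases h
      cases hs : splitSp rest with
      | nil => exact absurd hs (splitSp_ne_nil rest)
      | cons u us =>
        have e1 : spacesAt (' ' :: rest) p = p :: spacesAt rest (p + 1) := by
          simp [spacesAt]
        have e2 : p + (([] : List Char).length : Int) = p := by simp
        rw [e1, e2, ih (p + 1) u us hs]
        simp only [cursList]
        have e3 : p + 1 + (u.length : Int) = p + (u.length : Int) + 1 := by ring
        rw [e3]
    · simp only [splitSp, if_neg hc] at h
      cases hs : splitSp rest with
      | nil => exact absurd hs (splitSp_ne_nil rest)
      | cons u us =>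
        rw [hs] at h
        simp only [List.modifyHead, List.cons.injEq] at h
        obtain ⟨h1, h2⟩ := h
        subst h1; subst h2
        have e1 : spacesAt (c :: rest) p = spacesAt rest (p + 1) := by
          simp [spacesAt, hc]
        rw [e1, ih (p + 1) u us hs]
        have e2 : p + 1 + (u.length : Int) = p + (((c :: u).length : Nat) : Int) := by
          simp [List.length_cons]; ring
        rw [e2]

-- B's inner fold, after the first token: each step appends one tuple and advances the cursor.
lemma tailB (row : Int) : ∀ (ts : List (List Char)) (k p : Int)
    (acc : List (Int × Int × String)), 1 ≤ k →
    (PySem.List.enumerate ts k).foldl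
        (fun s it =>
          (s.1 ++ [(row + 1, s.2 + 2, String.ofList it.2)],
           s.2 + (it.2.length : Int) + (if it.1 == 0 then 0 else 1)))
        (acc, p)
      = (acc ++ ((cursList ts p).zip ts).map (fun ct => (row + 1, ct.1 + 2, String.ofList ct.2)),
         p + (ts.map (fun t => (t.length : Int) + 1)).sum) := by
  intro ts
  induction ts with
  | nil => intro k p acc hk; simp [PySem.List.enumerate_nil, cursList]
  | cons t ts ih =>
    intro k p acc hk
    rw [PySem.List.enumerate_cons]
    simp only [List.foldl_cons]
    have hk0 : (k == 0) = false := by simp only [beq_eq_false_iff_ne, ne_eq]; omega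
    rw [hk0]
    simp only [Bool.false_eq_true, if_false]
    rw [ih (k + 1) (p + (t.length : Int) + 1) (acc ++ [(row + 1, p + 2, String.ofList t)]) (by omega)]
    simp only [cursList, List.zip_cons_cons, List.map_cons, List.sum_cons, Prod.mk.injEq]
    constructor
    · simp
    · ring

-- Per kept line, A's appended block equals B's inner fold.
lemma line_eq (row : Int) (cs : List Char) (acc : List (Int × Int × String)) :
    ((PySem.List.enumerate (PySem.Chars.splitOn cs [' '])).foldl
        (fun s it =>
          (s.1 ++ [(row + 1, s.2 + 2, String.ofList it.2)],
           s.2 + (it.2.length : Int) + (if it.1 == 0 then 0 else 1)))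
        (acc, 0)).1
      = acc ++
        (((0 :: ((PySem.List.enumerate cs).filter (fun pc => pc.2 == ' ')).map (·.1)).zip
            (PySem.Chars.splitOn cs [' '])).map
          (fun ct => (row + 1, ct.1 + 2, String.ofList ct.2))) := by
  rw [splitOn_space, spaces_port]
  cases hs : splitSp cs with
  | nil => exact absurd hs (splitSp_ne_nil cs)
  | cons t ts =>
    rw [spacesAt_eq_cursList cs 0 t ts hs]
    rw [PySem.List.enumerate_cons]
    simp only [List.foldl_cons]
    have h0 : ((0 : Int) == 0) = true := by decide
    rw [h0]
    simp only [if_true]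
    have e0 : (0 : Int) + (t.length : Int) + 0 = 0 + (t.length : Int) := by ring
    have e1 : (0 : Int) + 1 = 1 := by ring
    rw [e0, e1, tailB row ts 1 (0 + (t.length : Int)) (acc ++ [(row + 1, 0 + 2, String.ofList t)]) (by omega)]
    simp only [List.zip_cons_cons, List.map_cons]
    simp

-- Outer loop: A's filter-then-fold equals B's fold-with-skip, over any enumerated lines.
lemma outer_eq : ∀ (ls : List (Int × List Char)) (acc : List (Int × Int × String)),
    (ls.filter (fun rl => !rl.2.isEmpty && (PySem.List.pyGet? rl.2 0 != some '#'))).foldl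
        (fun commands rl =>
          commands ++
            (((0 :: ((PySem.List.enumerate rl.2).filter (fun pc => pc.2 == ' ')).map (·.1)).zip
                (PySem.Chars.splitOn rl.2 [' '])).map
              (fun ct => (rl.1 + 1, ct.1 + 2, String.ofList ct.2))))
        acc
      = ls.foldl
          (fun commands rl =>
            if rl.2.isEmpty || PySem.List.pyGet? rl.2 0 == some '#' then commands
            else
              ((PySem.List.enumerate (PySem.Chars.splitOn rl.2 [' '])).foldl
                (fun s it =>
                  (s.1 ++ [(rl.1 + 1, s.2 + 2, String.ofList it.2)],
                   s.2 + (it.2.length : Int) + (if it.1 == 0 then 0 else 1)))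
                (commands, 0)).1)
          acc := by
  intro ls
  induction ls with
  | nil => intro acc; simp
  | cons rl rest ih =>
    intro acc
    by_cases hskip : rl.2.isEmpty = true ∨ PySem.List.pyGet? rl.2 0 = some '#'
    · have hA : (!rl.2.isEmpty && (PySem.List.pyGet? rl.2 0 != some '#')) = false := by
        rcases hskip with h | h <;> simp [h]
      have hB : (rl.2.isEmpty || PySem.List.pyGet? rl.2 0 == some '#') = true := by
        rcases hskip with h | h <;> simp [h]
      rw [List.filter_cons_of_neg (by simp [hA]), List.foldl_cons, if_pos hB]
      exact ih acc
    · rw [not_or] at hskip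
      have hA : (!rl.2.isEmpty && (PySem.List.pyGet? rl.2 0 != some '#')) = true := by
        simp only [Bool.and_eq_true, Bool.not_eq_true', bne_iff_ne, ne_eq]
        exact ⟨by simpa using hskip.1, hskip.2⟩
      have hB : ¬ ((rl.2.isEmpty || PySem.List.pyGet? rl.2 0 == some '#') = true) := by
        simp only [Bool.or_eq_true, beq_iff_eq, not_or]
        exact ⟨by simpa using hskip.1, hskip.2⟩
      rw [List.filter_cons_of_pos (by simp [hA]), List.foldl_cons, List.foldl_cons, if_neg hB]
      rw [ih, line_eq]

-- ===== VERDICT (by name: the statement is the Claim_ definition above) =====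
theorem parse_raw_input_spec : Claim_equal_parse_raw_input := by
  intro text _
  unfold Spec_parse_raw_input parse_raw_input parse_raw_input_alt
  exact outer_eq _ []
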